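-- pv_equiv track=rewrite | github.com/alexander-gruber/myprojects | experiments/sst/coral_bleaching.py | event_counter
-- ===== SOURCE A (Python) =====
-- def event_counter(data, threshold=27, min_dur=2):
--     above_threshold = False
--     events_count = 0
--     duration = 0
--
--     # Iterate through the time series
--     for value in data:
--         if value > threshold:
--             if not above_threshold:
--                 # Start of a potential new event
--                 above_threshold = True
--                 duration = 1
--             else:
--                 # Continuation of an event
--                 duration += 1
--         else:
--             if above_threshold and duration >= min_dur:
--                 # End of a valid event
--                 events_count += 1
--             above_threshold = False
--             duration = 0  # Reset the duration for the next potential event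
--
--     # Check if the last segment qualifies as an event
--     if above_threshold and duration >= min_dur:
--         events_count += 1
--
--     return events_count
-- ===== SOURCE B (Python) =====
-- def event_counter(data, threshold=27, min_dur=2):
--     need = max(min_dur, 1)
--     # backward pass: run[i] = length of the above-threshold run starting at i (0 if not above)
--     run = [0]
--     for v in reversed(data):
--         run.append(run[-1] + 1 if v > threshold else 0)
--     run.reverse()
--     # count run starts (previous run length 0) whose run is long enough
--     return sum(1 for prev, cur in zip([0] + run, run) if cur >= need and prev == 0)
-- ===== Notes on version B (the rewrite author's own statement) =====
-- stated objective: alternative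
-- what changed: Replaces A's online state machine (above_threshold/duration flags with a post-loop tail check) by a two-stage dynamic program: a backward pass builds the suffix run-length array run[i] = length of the above-threshold run starting at i, then a second pass counts indices that start a run (previous run length 0) with run[i] >= max(min_dur, 1).
import Mathlib
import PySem

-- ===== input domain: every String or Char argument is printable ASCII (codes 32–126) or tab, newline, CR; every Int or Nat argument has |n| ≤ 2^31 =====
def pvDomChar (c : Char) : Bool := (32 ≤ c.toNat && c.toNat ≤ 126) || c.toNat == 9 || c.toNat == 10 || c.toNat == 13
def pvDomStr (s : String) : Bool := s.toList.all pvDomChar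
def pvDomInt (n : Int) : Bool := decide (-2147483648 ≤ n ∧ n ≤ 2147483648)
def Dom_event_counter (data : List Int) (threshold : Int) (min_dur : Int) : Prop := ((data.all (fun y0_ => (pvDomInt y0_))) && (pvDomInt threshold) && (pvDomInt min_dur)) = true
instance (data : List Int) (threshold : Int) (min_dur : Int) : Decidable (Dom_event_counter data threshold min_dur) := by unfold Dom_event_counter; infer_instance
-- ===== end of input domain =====

-- B replaces A's online state machine (flags + post-loop tail check) by a two-stage DP:
-- a backward pass builds the suffix run-length array, a second pass counts qualifying run starts.


-- ===== PORT A =====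
-- A's loop: state (above_threshold, events_count, duration), then the post-loop tail check.
def event_counter_step (threshold min_dur : Int) (st : Bool × Int × Int) (value : Int) : Bool × Int × Int :=
  let (above_threshold, events_count, duration) := st
  if value > threshold then
    if !above_threshold then (true, events_count, 1)
    else (true, events_count, duration + 1)
  else
    (false, (if above_threshold && decide (duration ≥ min_dur) then events_count + 1 else events_count), 0)

def event_counter (data : List Int) (threshold : Int) (min_dur : Int) : Int :=
  let st := data.foldl (event_counter_step threshold min_dur) (false, 0, 0)
  if st.1 && decide (st.2.2 ≥ min_dur) then st.2.1 + 1 else st.2.1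

-- ===== PORT B =====
-- B's backward pass ('run = [0]; for v in reversed(data): append; run.reverse()') ported as the
-- corresponding structural recursion building the same suffix run-length list (exact).
def runList (threshold : Int) : List Int → List Int
  | [] => [0]
  | x :: t => (if x > threshold then (runList threshold t).headD 0 + 1 else 0) :: runList threshold t

-- B's counting pass: one step of 'sum(1 for prev, cur in zip([0] + run, run) if cur >= need and prev == 0)'
def runCountStep (need : Int) (acc : Int) (pc : Int × Int) : Int :=
  if decide (pc.2 ≥ need) && (pc.1 == 0) then acc + 1 else acc

def event_counter_alt (data : List Int) (threshold : Int) (min_dur : Int) : Int :=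
  let need : Int := max min_dur 1
  let run : List Int := runList threshold data
  (((0 : Int) :: run).zip run).foldl (runCountStep need) 0

-- ===== PRECONDITION & SPEC =====
def Spec_event_counter (data : List Int) (threshold : Int) (min_dur : Int) (out : Int) : Prop := out = event_counter_alt data threshold min_dur
instance (data : List Int) (threshold : Int) (min_dur : Int) (out : Int) : Decidable (Spec_event_counter data threshold min_dur out) := by unfold Spec_event_counter; infer_instance

-- ===== CLAIM (what is proved, stated in full; the proofs are below) =====
def Claim_equal_event_counter : Prop := ∀ (data : List Int) (threshold : Int) (min_dur : Int), Dom_event_counter data threshold min_dur → Spec_event_counter data threshold min_dur (event_counter data threshold min_dur)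

-- ===== LEMMAS AND PROOFS =====

-- proof-only intermediate: recursion on maximal above-threshold runs
def eventRec (threshold min_dur : Int) : List Int → Int
  | [] => 0
  | v :: rest =>
    if v > threshold then
      let run := rest.takeWhile (fun x => decide (x > threshold))
      (if (1 + (run.length : Int)) ≥ min_dur then 1 else 0) +
        eventRec threshold min_dur (rest.dropWhile (fun x => decide (x > threshold)))
    else
      eventRec threshold min_dur rest
termination_by l => l.length
decreasing_by
  · exact Nat.lt_succ_of_le (List.length_dropWhile_le _ _)
  · simp

theorem eventRec_cons_pos (threshold min_dur x : Int) (t : List Int) (hx : x > threshold) :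
    eventRec threshold min_dur (x :: t) =
      (if (1 + ((t.takeWhile (fun y => decide (y > threshold))).length : Int)) ≥ min_dur then 1 else 0) +
        eventRec threshold min_dur (t.dropWhile (fun y => decide (y > threshold))) := by
  rw [eventRec]; simp [hx]

theorem eventRec_cons_neg (threshold min_dur x : Int) (t : List Int) (hx : ¬ x > threshold) :
    eventRec threshold min_dur (x :: t) = eventRec threshold min_dur t := by
  rw [eventRec]; simp [hx]

-- A's fold equals eventRec: unified invariant over the two shapes of A's state.
theorem event_counter_inv (threshold min_dur : Int) (l : List Int) :
    (∀ c : Int,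
      (let st := l.foldl (event_counter_step threshold min_dur) (false, c, 0)
       if st.1 && decide (st.2.2 ≥ min_dur) then st.2.1 + 1 else st.2.1)
      = c + eventRec threshold min_dur l)
    ∧
    (∀ c d : Int, 1 ≤ d →
      (let st := l.foldl (event_counter_step threshold min_dur) (true, c, d)
       if st.1 && decide (st.2.2 ≥ min_dur) then st.2.1 + 1 else st.2.1)
      = c + (if d + ((l.takeWhile (fun x => decide (x > threshold))).length : Int) ≥ min_dur then 1 else 0)
          + eventRec threshold min_dur (l.dropWhile (fun x => decide (x > threshold)))) := by
  induction l with
  | nil =>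
    refine ⟨fun c => by simp [eventRec], fun c d hd => ?_⟩
    simp only [List.foldl_nil, List.takeWhile_nil, List.dropWhile_nil, eventRec]
    by_cases h : min_dur ≤ d <;> simp [h]
  | cons x t ih =>
    obtain ⟨ihP, ihQ⟩ := ih
    refine ⟨fun c => ?_, fun c d hd => ?_⟩
    · by_cases hx : x > threshold
      · have h1 := ihQ c 1 le_rfl
        simp only at h1
        simp only [List.foldl_cons,
          show event_counter_step threshold min_dur (false, c, 0) x = (true, c, 1) from by
            simp [event_counter_step, hx]]
        rw [h1, eventRec_cons_pos threshold min_dur x t hx]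
        ring
      · have h1 := ihP c
        simp only at h1
        simp only [List.foldl_cons,
          show event_counter_step threshold min_dur (false, c, 0) x = (false, c, 0) from by
            simp [event_counter_step, hx]]
        rw [h1, eventRec_cons_neg threshold min_dur x t hx]
    · by_cases hx : x > threshold
      · have h1 := ihQ c (d + 1) (by omega)
        simp only at h1
        simp only [List.foldl_cons,
          show event_counter_step threshold min_dur (true, c, d) x = (true, c, d + 1) from by
            simp [event_counter_step, hx]]
        rw [h1,
          List.takeWhile_cons_of_pos (by simpa using hx),
          List.dropWhile_cons_of_pos (by simpa using hx)]
        have hcond : (min_dur ≤ d + 1 + ((t.takeWhile (fun x => decide (x > threshold))).length : Int)) ↔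
            (min_dur ≤ d + (((x :: t.takeWhile (fun x => decide (x > threshold))).length : Int))) := by
          simp; omega
        by_cases h : min_dur ≤ d + 1 + ((t.takeWhile (fun x => decide (x > threshold))).length : Int)
        · rw [if_pos (by exact h), if_pos (hcond.mp h)]
        · rw [if_neg (by exact h), if_neg (fun hc => h (hcond.mpr hc))]
      · have h1 := ihP (if min_dur ≤ d then c + 1 else c)
        simp only at h1
        simp only [List.foldl_cons,
          show event_counter_step threshold min_dur (true, c, d) x
              = (false, (if min_dur ≤ d then c + 1 else c), 0) from by
            simp [event_counter_step, hx]]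
        rw [h1,
          List.takeWhile_cons_of_neg (by simpa using hx),
          List.dropWhile_cons_of_neg (by simpa using hx),
          eventRec_cons_neg threshold min_dur x t hx]
        by_cases h : min_dur ≤ d <;> simp [h]

-- head of the run-length list = length of the leading above-threshold run
theorem runList_headD (threshold : Int) (l : List Int) :
    (runList threshold l).headD 0 = ((l.takeWhile (fun x => decide (x > threshold))).length : Int) := by
  induction l with
  | nil => simp [runList]
  | cons x t ih =>
    by_cases hx : x > threshold
    · rw [List.takeWhile_cons_of_pos (p := fun y => decide (y > threshold)) (by simpa using hx)]
      simp only [runList, List.headD_cons, if_pos hx, List.length_cons, ih]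
      push_cast; ring
    · rw [List.takeWhile_cons_of_neg (p := fun y => decide (y > threshold)) (by simpa using hx)]
      simp [runList, hx]

-- shifting the accumulator out of the counting fold
theorem foldl_runCountStep_shift (need : Int) (L : List (Int × Int)) (a : Int) :
    L.foldl (runCountStep need) a = a + L.foldl (runCountStep need) 0 := by
  induction L generalizing a with
  | nil => simp
  | cons p t ih =>
    simp only [List.foldl_cons]
    rw [ih (runCountStep need a p), ih (runCountStep need 0 p)]
    unfold runCountStep
    by_cases h : (decide (p.2 ≥ need) && (p.1 == 0)) = true <;> simp [h] <;> ring

-- B's counting pass, with an arbitrary previous run length p, equals eventRec: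
-- p = 0 ⇒ count on l itself; p ≠ 0 ⇒ starts inside the leading run are suppressed.
theorem count_eq_eventRec (threshold min_dur : Int) (l : List Int) :
    (∀ p : Int,
      (p = 0 → ((p :: runList threshold l).zip (runList threshold l)).foldl (runCountStep (max min_dur 1)) 0
          = eventRec threshold min_dur l)
      ∧
      (p ≠ 0 → ((p :: runList threshold l).zip (runList threshold l)).foldl (runCountStep (max min_dur 1)) 0
          = eventRec threshold min_dur (l.dropWhile (fun x => decide (x > threshold))))) := by
  induction l with
  | nil =>
    intro p
    constructor <;> intro hp <;>
      simp [runList, runCountStep, eventRec, show ¬ (max min_dur 1 ≤ 0) by omega]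
  | cons x t ih =>
    intro p
    have hcons : runList threshold (x :: t)
        = (if x > threshold then (runList threshold t).headD 0 + 1 else 0) :: runList threshold t := rfl
    set h : Int := if x > threshold then (runList threshold t).headD 0 + 1 else 0 with hh
    have hsplit : ∀ q : Int, ((q :: runList threshold (x :: t)).zip (runList threshold (x :: t))).foldl (runCountStep (max min_dur 1)) 0
        = runCountStep (max min_dur 1) 0 (q, h)
          + ((h :: runList threshold t).zip (runList threshold t)).foldl (runCountStep (max min_dur 1)) 0 := by
      intro q
      have : ((q :: runList threshold (x :: t)).zip (runList threshold (x :: t)))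
          = (q, h) :: ((h :: runList threshold t).zip (runList threshold t)) := by rw [hcons]; rfl
      rw [this, List.foldl_cons, foldl_runCountStep_shift]
    by_cases hx : x > threshold
    · -- h = leading run length ≥ 1
      have hhead := runList_headD threshold t
      have hval : h = 1 + ((t.takeWhile (fun x => decide (x > threshold))).length : Int) := by
        rw [hh, if_pos hx, hhead]; ring
      have hpos : 1 ≤ h := by rw [hval]; omega
      have hrest := (ih h).2 (by omega)
      constructor <;> intro hp
      · rw [hsplit p, hrest, eventRec_cons_pos threshold min_dur x t hx]
        unfold runCountStep
        have : ((max min_dur 1) ≤ h) ↔ (min_dur ≤ 1 + ((t.takeWhile (fun x => decide (x > threshold))).length : Int)) := by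
          rw [hval]; omega
        by_cases hc : min_dur ≤ 1 + ((t.takeWhile (fun x => decide (x > threshold))).length : Int)
        · simp [hp, this.mpr hc, hc]
        · simp [hp, show ¬ ((max min_dur 1) ≤ h) from fun hb => hc (this.mp hb), hc]
      · rw [hsplit p, hrest,
          List.dropWhile_cons_of_pos (by simpa using hx)]
        unfold runCountStep
        simp [hp]
    · have h0 : h = 0 := by rw [hh, if_neg hx]
      have hrest := (ih h).1 h0
      constructor <;> intro hp
      · rw [hsplit p, hrest, eventRec_cons_neg threshold min_dur x t hx]
        unfold runCountStep
        simp [show ¬ ((max min_dur 1) ≤ h) by omega]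
      · rw [hsplit p, hrest,
          List.dropWhile_cons_of_neg (by simpa using hx),
          eventRec_cons_neg threshold min_dur x t hx]
        unfold runCountStep
        simp [show ¬ ((max min_dur 1) ≤ h) by omega]

-- ===== VERDICT (by name: the statement is the Claim_ definition above) =====
theorem event_counter_spec : Claim_equal_event_counter := by
  intro data threshold min_dur _
  unfold Spec_event_counter event_counter event_counter_alt
  rw [(count_eq_eventRec threshold min_dur data 0).1 rfl]
  simpa using (event_counter_inv threshold min_dur data).1 0
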